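-- pv_equiv track=rewrite | github.com/Amanuel94/CF-Solutions | C_Number_of_Minimums_on_a_Segment.py | build
-- ===== SOURCE A (Python) =====
-- def pw(n):
--     if n & ( n- 1)!= 0:
--         return 1 << n.bit_length()
--     return n
--
-- def build(a):
--     m = pw(len(a))
--
--     tree = [0]*(2*m - 1)
--     treemp = [{} for _ in range(2*m - 1)]
--     for i in range(len(a)):
--         tree[m - 1 + i] = a[i]
--         treemp[m - 1 + i][a[i]] = 1
--
--     for i in range(m-2, -1, -1):
--         tree[i] = min(tree[2*i + 1], tree[2*i + 2])
--         for k in treemp[2*i + 1]: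
--             treemp[i][k] = treemp[i].get(k, 0) + treemp[2*i + 1][k]
--
--         for k in treemp[2*i + 2]:
--             treemp[i][k] = treemp[i].get(k, 0) + treemp[2*i + 2][k]
--
--     return tree, treemp
-- ===== SOURCE B (Python) =====
-- def pw(n):
--     if n & ( n- 1)!= 0:
--         return 1 << n.bit_length()
--     return n
--
-- def build(a):
--     n = len(a)
--     m = pw(n)
--     tree = [0] * (2 * m - 1)
--     treemp = [{} for _ in range(2 * m - 1)]
--
--     def recurse(node, lo, hi):
--         if hi - lo == 1:
--             if lo < n:
--                 tree[node] = a[lo]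
--                 treemp[node] = {a[lo]: 1}
--             return
--         mid = (lo + hi) // 2
--         recurse(2 * node + 1, lo, mid)
--         recurse(2 * node + 2, mid, hi)
--         tree[node] = min(tree[2 * node + 1], tree[2 * node + 2])
--         merged = {}
--         for k, v in treemp[2 * node + 1].items():
--             merged[k] = merged.get(k, 0) + v
--         for k, v in treemp[2 * node + 2].items():
--             merged[k] = merged.get(k, 0) + v
--         treemp[node] = merged
--
--     if m > 0:
--         recurse(0, 0, m)
--     return tree, treemp
-- ===== Notes on version B (the rewrite author's own statement) =====
-- stated objective: alternative
-- what changed: Replaces the two iterative passes (leaf fill, then a bottom-up loop over node indices m-2..0) with a single recursive divide-and-conquer descent over the implicit tree that fills leaves and merges children on the way back up.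
import Mathlib
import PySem

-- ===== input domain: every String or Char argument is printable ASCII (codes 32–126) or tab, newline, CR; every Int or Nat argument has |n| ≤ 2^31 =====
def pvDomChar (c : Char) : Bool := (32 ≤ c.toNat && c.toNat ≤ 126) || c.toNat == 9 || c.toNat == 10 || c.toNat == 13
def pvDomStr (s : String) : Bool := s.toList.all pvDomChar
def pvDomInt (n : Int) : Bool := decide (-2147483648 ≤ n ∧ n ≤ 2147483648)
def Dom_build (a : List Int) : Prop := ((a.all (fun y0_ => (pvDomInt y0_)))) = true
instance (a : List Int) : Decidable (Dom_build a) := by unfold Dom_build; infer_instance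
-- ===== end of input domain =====

-- B replaces A's two iterative passes (leaf fill, then a bottom-up loop over nodes m-2..0) by one
-- recursive divide-and-conquer descent over the implicit tree; same return value, proved equal.

-- ===== PORT A =====
-- dicts are ported by hand as assoc lists in insertion order (exact for Python dict over Int keys:
-- lookup is first match, overwrite keeps position, new keys append)
def dGetD (d : List (Int × Int)) (k : Int) (dflt : Int) : Int :=
  match d with
  | [] => dflt
  | (k', v) :: rest => if k' = k then v else dGetD rest k dflt

def dInsert (d : List (Int × Int)) (k : Int) (v : Int) : List (Int × Int) :=
  match d with
  | [] => [(k, v)]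
  | (k', v') :: rest => if k' = k then (k', v) :: rest else (k', v') :: dInsert rest k v

-- 'for k in src: dst[k] = dst.get(k, 0) + src[k]'  (both Pythons contain this very loop)
def mergeLoop (dst src : List (Int × Int)) : List (Int × Int) :=
  src.foldl (fun acc kv => dInsert acc kv.1 (dGetD acc kv.1 0 + kv.2)) dst

-- Python's n.bit_length() for n ≥ 0 is Nat.size n (exact)
def pw (n : Nat) : Nat :=
  if n &&& (n - 1) ≠ 0 then 1 <<< Nat.size n else n

def build (a : List Int) : List Int × (List (List (Int × Int))) :=
  let m := pw a.length
  let init : List Int × List (List (Int × Int)) :=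
    (List.replicate (2*m - 1) 0, List.replicate (2*m - 1) [])
  let s1 := (List.range a.length).foldl (fun s i =>
      (s.1.set (m - 1 + i) (a.getD i 0),
       s.2.set (m - 1 + i) (dInsert (s.2.getD (m - 1 + i) []) (a.getD i 0) 1))) init
  ((List.range (m - 1)).reverse).foldl (fun s i =>
      (s.1.set i (min (s.1.getD (2*i+1) 0) (s.1.getD (2*i+2) 0)),
       s.2.set i (mergeLoop (mergeLoop (s.2.getD i []) (s.2.getD (2*i+1) []))
                            (s.2.getD (2*i+2) [])))) s1

-- ===== PORT B =====
def recB (a : List Int) (node lo hi : Nat) (s : List Int × List (List (Int × Int))) :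
    List Int × List (List (Int × Int)) :=
  if hi - lo = 1 then
    if lo < a.length then
      (s.1.set node (a.getD lo 0), s.2.set node (dInsert [] (a.getD lo 0) 1))
    else s
  else if hi ≤ lo + 1 then s  -- totality guard only: Python's recursion never reaches hi ≤ lo
  else
    let mid := (lo + hi) / 2
    let s1 := recB a (2*node+1) lo mid s
    let s2 := recB a (2*node+2) mid hi s1
    (s2.1.set node (min (s2.1.getD (2*node+1) 0) (s2.1.getD (2*node+2) 0)),
     s2.2.set node (mergeLoop (mergeLoop [] (s2.2.getD (2*node+1) []))
                              (s2.2.getD (2*node+2) [])))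
termination_by hi - lo
decreasing_by all_goals omega

def build_alt (a : List Int) : List Int × (List (List (Int × Int))) :=
  let m := pw a.length
  let init : List Int × List (List (Int × Int)) :=
    (List.replicate (2*m - 1) 0, List.replicate (2*m - 1) [])
  if 0 < m then recB a 0 0 m init else init

-- ===== PRECONDITION & SPEC =====
def Spec_build (a : List Int) (out : List Int × (List (List (Int × Int)))) : Prop := out = build_alt a
instance (a : List Int) (out : List Int × (List (List (Int × Int)))) : Decidable (Spec_build a out) := by unfold Spec_build; infer_instance

-- ===== CLAIM (what is proved, stated in full; the proofs are below) =====
def Claim_equal_build : Prop := ∀ (a : List Int), Dom_build a → Spec_build a (build a)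

-- ===== LEMMAS AND PROOFS =====

-- ---- power-of-two facts about pw ----
theorem tb_hi {k x : Nat} (h1 : 2^k ≤ x) (h2 : x < 2^(k+1)) : Nat.testBit x k = true := by
  rw [Nat.testBit_eq_decide_div_mod_eq]
  have hd : x / 2^k = 1 := by
    refine Nat.div_eq_of_lt_le (by simpa using h1) ?_
    calc x < 2^(k+1) := h2
      _ = (1+1) * 2^k := by ring
  simp [hd]

theorem pow_of_and_pred {n : Nat} (h1 : 1 ≤ n) (h : n &&& (n-1) = 0) : ∃ k, n = 2^k := by
  refine ⟨Nat.size n - 1, ?_⟩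
  have hs : 1 ≤ Nat.size n := by
    rw [Nat.one_le_iff_ne_zero, Ne, Nat.size_eq_zero]; omega
  have hle : 2^(Nat.size n - 1) ≤ n := Nat.lt_size.mp (by omega)
  have hlt : n < 2^(Nat.size n - 1 + 1) := by
    have := Nat.lt_size_self n; rwa [show Nat.size n - 1 + 1 = Nat.size n by omega]
  by_contra hne
  have hgt : 2^(Nat.size n - 1) < n := lt_of_le_of_ne hle (fun e => hne e.symm)
  have t1 : Nat.testBit n (Nat.size n - 1) = true := tb_hi hle hlt
  have t2 : Nat.testBit (n-1) (Nat.size n - 1) = true := tb_hi (by omega) (by omega)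
  have t3 : Nat.testBit (n &&& (n-1)) (Nat.size n - 1) = true := by
    rw [Nat.testBit_and, t1, t2]; rfl
  rw [h, Nat.zero_testBit] at t3; exact absurd t3 (by simp)

theorem pw_spec {n : Nat} (h1 : 1 ≤ n) : (∃ k, pw n = 2^k) ∧ n ≤ pw n := by
  unfold pw
  split
  · refine ⟨⟨Nat.size n, by rw [Nat.shiftLeft_eq, one_mul]⟩, ?_⟩
    rw [Nat.shiftLeft_eq, one_mul]
    exact le_of_lt (Nat.lt_size_self n)
  · rename_i hc
    rcases pow_of_and_pred h1 (by omega) with ⟨k, hk⟩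
    exact ⟨⟨k, hk⟩, le_refl n⟩

-- ---- canonical per-node values ----
def finT (m : Nat) (a : List Int) (j : Nat) : Int :=
  if h : m ≤ j + 1 then a.getD (j + 1 - m) 0
  else min (finT m a (2*j+1)) (finT m a (2*j+2))
termination_by m - 1 - j
decreasing_by all_goals omega

def finD (m : Nat) (a : List Int) (j : Nat) : List (Int × Int) :=
  if h : m ≤ j + 1 then (if j + 1 - m < a.length then [(a.getD (j + 1 - m) 0, 1)] else [])
  else mergeLoop (mergeLoop [] (finD m a (2*j+1))) (finD m a (2*j+2))
termination_by m - 1 - j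
decreasing_by all_goals omega

-- ---- list toolbox ----
theorem mr_getD {α} (f : Nat → α) (N p : Nat) (d : α) :
    (((List.range N).map f).getD p d) = if p < N then f p else d := by
  split
  · rename_i h
    rw [List.getD_eq_getElem _ _ (by simpa using h)]
    simp
  · rename_i h
    exact List.getD_eq_default _ _ (by simpa using Nat.le_of_not_lt h)

theorem mr_set {α} (f : Nat → α) (N p : Nat) (v : α) :
    ((List.range N).map f).set p v
      = (List.range N).map (fun j => if j = p then v else f j) := by
  apply List.ext_getElem
  · simp
  · intro i h1 h2
    simp only [List.getElem_set, List.getElem_map, List.getElem_range]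
    split
    · rename_i h; simp [h.symm]
    · rename_i h; rw [if_neg (fun e => h e.symm)]

theorem mr_congr {α} (f g : Nat → α) (N : Nat) (h : ∀ j, j < N → f j = g j) :
    (List.range N).map f = (List.range N).map g :=
  List.map_congr_left (fun j hj => h j (List.mem_range.mp hj))

theorem getD_set {α} (l : List α) (p : Nat) (v d : α) (j : Nat) :
    ((l.set p v).getD j d) = if j = p ∧ p < l.length then v else l.getD j d := by
  rw [List.getD_eq_getElem?_getD, List.getD_eq_getElem?_getD, List.getElem?_set]
  split
  · rename_i h
    subst h
    split
    · rename_i h2; rw [if_pos ⟨rfl, h2⟩]; rfl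
    · rename_i h2
      rw [if_neg (fun hc => h2 hc.2), List.getElem?_eq_none (by omega)]
  · rename_i h
    rw [if_neg (fun hc => h hc.1.symm)]

-- ---- A: the leaf-filling pass ----
theorem leafA (a : List Int) (m : Nat) (hnm : a.length ≤ m) :
    ∀ k, k ≤ a.length →
    (List.range k).foldl (fun s i =>
      (s.1.set (m - 1 + i) (a.getD i 0),
       s.2.set (m - 1 + i) (dInsert (s.2.getD (m - 1 + i) []) (a.getD i 0) 1)))
      (((List.range (2*m-1)).map (fun _ => (0:Int))),
       ((List.range (2*m-1)).map (fun _ => ([] : List (Int × Int)))))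
    = ((List.range (2*m-1)).map (fun j => if m ≤ j+1 ∧ j+1-m < k then a.getD (j+1-m) 0 else 0),
       (List.range (2*m-1)).map (fun j => if m ≤ j+1 ∧ j+1-m < k then [(a.getD (j+1-m) 0, 1)] else [])) := by
  intro k
  induction k with
  | zero =>
    intro _
    simp only [List.range_zero, List.foldl_nil]
    refine Prod.ext ?_ ?_ <;>
      exact mr_congr _ _ _ (fun j hj => by simp)
  | succ k ih =>
    intro hk
    have hk' : k ≤ a.length := by omega
    have hlt : m - 1 + k < 2*m - 1 := by omega
    rw [List.range_succ, List.foldl_append, ih hk', List.foldl_cons, List.foldl_nil]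
    have hget : (((List.range (2*m-1)).map
        (fun j => if m ≤ j+1 ∧ j+1-m < k then [(a.getD (j+1-m) 0, 1)] else ([] : List (Int × Int)))).getD (m - 1 + k) [])
        = [] := by
      rw [mr_getD, if_pos hlt, if_neg (by omega)]
    refine Prod.ext ?_ ?_
    · show ((List.range (2*m-1)).map _).set (m-1+k) (a.getD k 0) = _
      rw [mr_set]
      refine mr_congr _ _ _ (fun j hj => ?_)
      by_cases hje : j = m - 1 + k
      · rw [if_pos hje, if_pos (by omega)]
        have : j + 1 - m = k := by omega
        rw [this]
      · rw [if_neg hje]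
        split <;> rename_i h1
        · rw [if_pos (by omega)]
        · rw [if_neg (by omega)]
    · show ((List.range (2*m-1)).map _).set (m-1+k) _ = _
      rw [hget, mr_set]
      refine mr_congr _ _ _ (fun j hj => ?_)
      by_cases hje : j = m - 1 + k
      · rw [if_pos hje, if_pos (by omega)]
        have : j + 1 - m = k := by omega
        rw [this]; rfl
      · rw [if_neg hje]
        split <;> rename_i h1
        · rw [if_pos (by omega)]
        · rw [if_neg (by omega)]

-- ---- A: the bottom-up pass ----
theorem downA (a : List Int) (m : Nat) :
    ∀ t, t ≤ m - 1 →
    ((List.range t).reverse).foldl (fun s i =>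
      (s.1.set i (min (s.1.getD (2*i+1) 0) (s.1.getD (2*i+2) 0)),
       s.2.set i (mergeLoop (mergeLoop (s.2.getD i []) (s.2.getD (2*i+1) []))
                            (s.2.getD (2*i+2) []))))
      ((List.range (2*m-1)).map (fun j => if t ≤ j then finT m a j else 0),
       (List.range (2*m-1)).map (fun j => if t ≤ j then finD m a j else []))
    = ((List.range (2*m-1)).map (finT m a), (List.range (2*m-1)).map (finD m a)) := by
  intro t
  induction t with
  | zero =>
    intro _
    simp only [List.range_zero, List.reverse_nil, List.foldl_nil]
    refine Prod.ext ?_ ?_ <;> exact mr_congr _ _ _ (fun j hj => by simp)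
  | succ t ih =>
    intro ht
    have htm : t + 2 ≤ m := by omega
    have h1 : 2*t+1 < 2*m-1 := by omega
    have h2 : 2*t+2 < 2*m-1 := by omega
    have htl : t < 2*m-1 := by omega
    rw [List.range_succ, List.reverse_append, List.reverse_singleton, List.singleton_append,
        List.foldl_cons]
    have hgT1 : (((List.range (2*m-1)).map (fun j => if t+1 ≤ j then finT m a j else 0)).getD (2*t+1) 0)
        = finT m a (2*t+1) := by rw [mr_getD, if_pos h1, if_pos (by omega)]
    have hgT2 : (((List.range (2*m-1)).map (fun j => if t+1 ≤ j then finT m a j else 0)).getD (2*t+2) 0)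
        = finT m a (2*t+2) := by rw [mr_getD, if_pos h2, if_pos (by omega)]
    have hgD0 : (((List.range (2*m-1)).map (fun j => if t+1 ≤ j then finD m a j else [])).getD t [])
        = [] := by rw [mr_getD, if_pos htl, if_neg (by omega)]
    have hgD1 : (((List.range (2*m-1)).map (fun j => if t+1 ≤ j then finD m a j else [])).getD (2*t+1) [])
        = finD m a (2*t+1) := by rw [mr_getD, if_pos h1, if_pos (by omega)]
    have hgD2 : (((List.range (2*m-1)).map (fun j => if t+1 ≤ j then finD m a j else [])).getD (2*t+2) [])
        = finD m a (2*t+2) := by rw [mr_getD, if_pos h2, if_pos (by omega)]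
    have hfT : min (finT m a (2*t+1)) (finT m a (2*t+2)) = finT m a t := by
      conv_rhs => rw [finT]
      rw [dif_neg (by omega)]
    have hfD : mergeLoop (mergeLoop [] (finD m a (2*t+1))) (finD m a (2*t+2)) = finD m a t := by
      conv_rhs => rw [finD]
      rw [dif_neg (by omega)]
    simp only [hgT1, hgT2, hgD0, hgD1, hgD2]
    rw [hfT, hfD, mr_set, mr_set]
    have eT : (List.range (2*m-1)).map (fun j => if j = t then finT m a t else if t+1 ≤ j then finT m a j else 0)
        = (List.range (2*m-1)).map (fun j => if t ≤ j then finT m a j else 0) := by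
      refine mr_congr _ _ _ (fun j hj => ?_)
      by_cases hje : j = t
      · subst hje; rw [if_pos rfl, if_pos (le_refl _)]
      · rw [if_neg hje]
        split <;> rename_i hx
        · rw [if_pos (by omega)]
        · rw [if_neg (by omega)]
    have eD : (List.range (2*m-1)).map (fun j => if j = t then finD m a t else if t+1 ≤ j then finD m a j else [])
        = (List.range (2*m-1)).map (fun j => if t ≤ j then finD m a j else []) := by
      refine mr_congr _ _ _ (fun j hj => ?_)
      by_cases hje : j = t
      · subst hje; rw [if_pos rfl, if_pos (le_refl _)]
      · rw [if_neg hje]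
        split <;> rename_i hx
        · rw [if_pos (by omega)]
        · rw [if_neg (by omega)]
    rw [eT, eD]
    exact ih (by omega)

theorem buildA_eq (a : List Int) (hn : 1 ≤ a.length) :
    build a = ((List.range (2*(pw a.length)-1)).map (finT (pw a.length) a),
               (List.range (2*(pw a.length)-1)).map (finD (pw a.length) a)) := by
  obtain ⟨⟨K, hK⟩, hnm⟩ := pw_spec hn
  set m := pw a.length with hm
  have hm1 : 1 ≤ m := le_trans hn hnm
  show ((List.range (m-1)).reverse).foldl _
      ((List.range a.length).foldl _
        (List.replicate (2*m-1) 0, List.replicate (2*m-1) [])) = _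
  have hrep0 : (List.replicate (2*m-1) (0:Int)) = (List.range (2*m-1)).map (fun _ => (0:Int)) := by
    simp [List.map_const']
  have hrep1 : (List.replicate (2*m-1) ([] : List (Int × Int))) = (List.range (2*m-1)).map (fun _ => ([] : List (Int × Int))) := by
    simp [List.map_const']
  rw [hrep0, hrep1, leafA a m hnm a.length (le_refl _)]
  have e1 : (List.range (2*m-1)).map (fun j => if m ≤ j+1 ∧ j+1-m < a.length then a.getD (j+1-m) 0 else 0)
      = (List.range (2*m-1)).map (fun j => if m - 1 ≤ j then finT m a j else 0) := by
    refine mr_congr _ _ _ (fun j hj => ?_)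
    by_cases hjm : m - 1 ≤ j
    · rw [if_pos hjm, finT, dif_pos (by omega)]
      by_cases hlen : j+1-m < a.length
      · rw [if_pos ⟨by omega, hlen⟩]
      · rw [if_neg (fun hc => hlen hc.2), List.getD_eq_default _ _ (by omega)]
    · rw [if_neg hjm, if_neg (fun hc => hjm (by omega))]
  have e2 : (List.range (2*m-1)).map (fun j => if m ≤ j+1 ∧ j+1-m < a.length then [(a.getD (j+1-m) 0, 1)] else ([] : List (Int × Int)))
      = (List.range (2*m-1)).map (fun j => if m - 1 ≤ j then finD m a j else []) := by
    refine mr_congr _ _ _ (fun j hj => ?_)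
    by_cases hjm : m - 1 ≤ j
    · rw [if_pos hjm, finD, dif_pos (by omega)]
      by_cases hlen : j+1-m < a.length
      · rw [if_pos ⟨by omega, hlen⟩, if_pos hlen]
      · rw [if_neg (fun hc => hlen hc.2), if_neg hlen]
    · rw [if_neg hjm, if_neg (fun hc => hjm (by omega))]
  rw [e1, e2, downA a m (m-1) (le_refl _)]

-- ---- B: subtree index sets ----
def InSub (node k j : Nat) : Prop := ∃ l, l ≤ k ∧ (j+1)/2^l = node+1

theorem InSub_self (node k : Nat) : InSub node k node := ⟨0, Nat.zero_le _, by simp⟩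

theorem not_InSub_of_lt {node k j : Nat} (h : j < node) : ¬ InSub node k j := by
  rintro ⟨l, _, hl⟩
  have := Nat.div_le_self (j+1) (2^l)
  omega

theorem InSub_zero (node j : Nat) : InSub node 0 j ↔ j = node := by
  constructor
  · rintro ⟨l, hl, he⟩
    interval_cases l
    simp at he
    omega
  · rintro rfl; exact InSub_self _ 0

theorem InSub_succ (node k j : Nat) :
    InSub node (k+1) j ↔ j = node ∨ InSub (2*node+1) k j ∨ InSub (2*node+2) k j := by
  constructor
  · rintro ⟨l, hl, he⟩
    match l with
    | 0 => left; simp at he; omega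
    | l'+1 =>
      right
      have hq : (j+1)/2^l' / 2 = node + 1 := by
        rw [Nat.div_div_eq_div_mul, ← pow_succ]; exact he
      have : (j+1)/2^l' = 2*node+2 ∨ (j+1)/2^l' = 2*node+3 := by omega
      rcases this with h | h
      · exact Or.inl ⟨l', by omega, by rw [h]⟩
      · exact Or.inr ⟨l', by omega, by rw [h]⟩
  · rintro (rfl | ⟨l, hl, he⟩ | ⟨l, hl, he⟩)
    · exact InSub_self _ (k+1)
    · refine ⟨l+1, by omega, ?_⟩
      rw [pow_succ, ← Nat.div_div_eq_div_mul, he]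
      omega
    · refine ⟨l+1, by omega, ?_⟩
      rw [pow_succ, ← Nat.div_div_eq_div_mul, he]
      omega

-- ---- B: correctness of the recursive descent ----
theorem recB_spec (a : List Int) (m : Nat) :
    ∀ k node lo (s : List Int × List (List (Int × Int))),
    (node+1)*2^k = m + lo → lo + 2^k ≤ m →
    s.1.length = 2*m-1 → s.2.length = 2*m-1 →
    (∀ j, m ≤ j+1 → a.length ≤ j+1-m → s.1.getD j 0 = 0 ∧ s.2.getD j [] = []) →
    (recB a node lo (lo + 2^k) s).1.length = 2*m-1 ∧
    (recB a node lo (lo + 2^k) s).2.length = 2*m-1 ∧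
    (∀ j, j < 2*m-1 →
      (InSub node k j → (recB a node lo (lo + 2^k) s).1.getD j 0 = finT m a j ∧
                        (recB a node lo (lo + 2^k) s).2.getD j [] = finD m a j)
      ∧ (¬ InSub node k j → (recB a node lo (lo + 2^k) s).1.getD j 0 = s.1.getD j 0 ∧
                            (recB a node lo (lo + 2^k) s).2.getD j [] = s.2.getD j [])) := by
  intro k
  induction k with
  | zero =>
    intro node lo s hinv hle hl1 hl2 hpad
    simp only [pow_zero] at hinv hle ⊢
    have hnode : node = m + lo - 1 := by omega
    have hnlt : node < 2*m-1 := by omega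
    rw [recB]
    rw [if_pos (show lo + 1 - lo = 1 from by omega)]
    by_cases hlo : lo < a.length
    · rw [if_pos hlo]
      refine ⟨by simp [hl1], by simp [hl2], fun j hj => ⟨fun hin => ?_, fun hout => ?_⟩⟩
      · rw [InSub_zero] at hin
        subst hin
        constructor
        · show (s.1.set j _).getD j 0 = _
          rw [getD_set, if_pos ⟨rfl, by omega⟩, finT, dif_pos (by omega),
              show j + 1 - m = lo from by omega]
        · show (s.2.set j _).getD j [] = _
          rw [getD_set, if_pos ⟨rfl, by omega⟩, finD, dif_pos (by omega),
              show j + 1 - m = lo from by omega, if_pos hlo]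
          rfl
      · rw [InSub_zero] at hout
        exact ⟨by rw [getD_set, if_neg (fun hc => hout hc.1)],
               by rw [getD_set, if_neg (fun hc => hout hc.1)]⟩
    · rw [if_neg hlo]
      refine ⟨hl1, hl2, fun j hj => ⟨fun hin => ?_, fun _ => ⟨rfl, rfl⟩⟩⟩
      rw [InSub_zero] at hin
      subst hin
      obtain ⟨p1, p2⟩ := hpad j (by omega) (by omega)
      refine ⟨?_, ?_⟩
      · rw [p1, finT, dif_pos (by omega), List.getD_eq_default _ _ (by omega)]
      · rw [p2, finD, dif_pos (by omega), if_neg (by omega)]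
  | succ k ih =>
    intro node lo s hinv hle hl1 hl2 hpad
    have hp : (2:Nat) ≤ 2^(k+1) := by
      have := Nat.one_le_two_pow (n := k)
      calc (2:Nat) = 2*1 := by omega
        _ ≤ 2*2^k := by omega
        _ = 2^(k+1) := by rw [pow_succ]; ring
    have hppos : (1:Nat) ≤ 2^k := Nat.one_le_two_pow
    have hmid : (lo + (lo + 2^(k+1))) / 2 = lo + 2^k := by
      have h2 : lo + (lo + 2^(k+1)) = (lo + 2^k) * 2 := by rw [pow_succ]; ring
      rw [h2, Nat.mul_div_cancel _ (by omega)]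
    have hinv' : (2*node+2)*2^k = m + lo := by
      have : (node+1)*2^(k+1) = (2*node+2)*2^k := by rw [pow_succ]; ring
      omega
    have hinvR : (2*node+3)*2^k = m + (lo + 2^k) := by
      have : (2*node+3)*2^k = (2*node+2)*2^k + 2^k := by ring
      omega
    have hnode_small : node + 2 ≤ m := by
      have e1 : (node+2)*2^(k+1) = m + lo + 2^(k+1) := by
        have : (node+2)*2^(k+1) = (node+1)*2^(k+1) + 2^(k+1) := by ring
        omega
      have e2 : (node+2)*2 ≤ (node+2)*2^(k+1) := Nat.mul_le_mul_left _ hp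
      omega
    have hc1 : 2*node+1 < 2*m-1 := by
      have e2 : (2*node+2)*1 ≤ (2*node+2)*2^k := Nat.mul_le_mul_left _ hppos
      omega
    have hc2 : 2*node+2 < 2*m-1 := by
      have e2 : (2*node+2)*1 ≤ (2*node+2)*2^k := Nat.mul_le_mul_left _ hppos
      have e3 : (2*node+2)*2^k + 2^k ≤ m + m := by omega
      omega
    rw [recB, if_neg (by omega), if_neg (by omega)]
    simp only [hmid]
    have hleL : lo + 2^k ≤ m := by omega
    obtain ⟨L1, L2, LH⟩ := ih (2*node+1) lo s hinv' hleL hl1 hl2 hpad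
    set s1 := recB a (2*node+1) lo (lo + 2^k) s with hs1
    have hpad1 : ∀ j, m ≤ j+1 → a.length ≤ j+1-m → s1.1.getD j 0 = 0 ∧ s1.2.getD j [] = [] := by
      intro j hj1 hj2
      by_cases hjlt : j < 2*m-1
      · by_cases hin : InSub (2*node+1) k j
        · obtain ⟨q1, q2⟩ := (LH j hjlt).1 hin
          refine ⟨?_, ?_⟩
          · rw [q1, finT, dif_pos hj1, List.getD_eq_default _ _ (by omega)]
          · rw [q2, finD, dif_pos hj1, if_neg (by omega)]
        · obtain ⟨q1, q2⟩ := (LH j hjlt).2 hin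
          rw [q1, q2]; exact hpad j hj1 hj2
      · refine ⟨List.getD_eq_default _ _ (by omega), List.getD_eq_default _ _ (by omega)⟩
    have hhiR : lo + 2^(k+1) = (lo + 2^k) + 2^k := by rw [pow_succ]; omega
    rw [hhiR]
    obtain ⟨R1, R2, RH⟩ := ih (2*node+2) (lo + 2^k) s1 hinvR (by omega) L1 L2 hpad1
    set s2 := recB a (2*node+2) (lo + 2^k) ((lo + 2^k) + 2^k) s1 with hs2
    have hr1 : s2.1.getD (2*node+1) 0 = finT m a (2*node+1) := by
      have hni : ¬ InSub (2*node+2) k (2*node+1) := not_InSub_of_lt (by omega)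
      rw [((RH _ hc1).2 hni).1, ((LH _ hc1).1 (InSub_self _ _)).1]
    have hd1 : s2.2.getD (2*node+1) [] = finD m a (2*node+1) := by
      have hni : ¬ InSub (2*node+2) k (2*node+1) := not_InSub_of_lt (by omega)
      rw [((RH _ hc1).2 hni).2, ((LH _ hc1).1 (InSub_self _ _)).2]
    have hr2 : s2.1.getD (2*node+2) 0 = finT m a (2*node+2) :=
      ((RH _ hc2).1 (InSub_self _ _)).1
    have hd2 : s2.2.getD (2*node+2) [] = finD m a (2*node+2) :=
      ((RH _ hc2).1 (InSub_self _ _)).2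
    have hfT : min (finT m a (2*node+1)) (finT m a (2*node+2)) = finT m a node := by
      conv_rhs => rw [finT]
      rw [dif_neg (by omega)]
    have hfD : mergeLoop (mergeLoop [] (finD m a (2*node+1))) (finD m a (2*node+2)) = finD m a node := by
      conv_rhs => rw [finD]
      rw [dif_neg (by omega)]
    refine ⟨by simp [R1], by simp [R2], fun j hj => ⟨fun hin => ?_, fun hout => ?_⟩⟩
    · by_cases hje : j = node
      · subst hje
        refine ⟨?_, ?_⟩
        · show (s2.1.set j _).getD j 0 = _
          rw [getD_set, if_pos ⟨rfl, by omega⟩, hr1, hr2, hfT]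
        · show (s2.2.set j _).getD j [] = _
          rw [getD_set, if_pos ⟨rfl, by omega⟩, hd1, hd2, hfD]
      · rw [InSub_succ] at hin
        rcases hin with hin | hin | hin
        · exact absurd hin hje
        · -- in the left subtree
          by_cases hinR : InSub (2*node+2) k j
          · obtain ⟨q1, q2⟩ := (RH j hj).1 hinR
            exact ⟨by rw [getD_set, if_neg (fun hc => hje hc.1), q1],
                   by rw [getD_set, if_neg (fun hc => hje hc.1), q2]⟩
          · obtain ⟨q1, q2⟩ := (RH j hj).2 hinR
            obtain ⟨p1, p2⟩ := (LH j hj).1 hin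
            exact ⟨by rw [getD_set, if_neg (fun hc => hje hc.1), q1, p1],
                   by rw [getD_set, if_neg (fun hc => hje hc.1), q2, p2]⟩
        · obtain ⟨q1, q2⟩ := (RH j hj).1 hin
          exact ⟨by rw [getD_set, if_neg (fun hc => hje hc.1), q1],
                 by rw [getD_set, if_neg (fun hc => hje hc.1), q2]⟩
    · rw [InSub_succ] at hout
      simp only [not_or] at hout
      obtain ⟨ho1, ho2, ho3⟩ := hout
      obtain ⟨q1, q2⟩ := (RH j hj).2 ho3
      obtain ⟨p1, p2⟩ := (LH j hj).2 ho2
      exact ⟨by rw [getD_set, if_neg (fun hc => ho1 hc.1), q1, p1],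
             by rw [getD_set, if_neg (fun hc => ho1 hc.1), q2, p2]⟩

theorem buildB_eq (a : List Int) (hn : 1 ≤ a.length) :
    build_alt a = ((List.range (2*(pw a.length)-1)).map (finT (pw a.length) a),
                   (List.range (2*(pw a.length)-1)).map (finD (pw a.length) a)) := by
  obtain ⟨⟨K, hK⟩, hnm⟩ := pw_spec hn
  set m := pw a.length with hm
  have hm1 : 1 ≤ m := le_trans hn hnm
  show (if 0 < m then recB a 0 0 m (List.replicate (2*m-1) 0, List.replicate (2*m-1) []) else _) = _
  rw [if_pos (by omega)]
  have hrep : ∀ j, m ≤ j+1 → a.length ≤ j+1-m →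
      ((List.replicate (2*m-1) (0:Int)), (List.replicate (2*m-1) ([] : List (Int × Int)))).1.getD j 0 = 0 ∧
      ((List.replicate (2*m-1) (0:Int)), (List.replicate (2*m-1) ([] : List (Int × Int)))).2.getD j [] = [] := by
    intro j _ _
    constructor <;>
    · show (List.replicate _ _).getD j _ = _
      by_cases hj : j < 2*m-1
      · rw [List.getD_eq_getElem _ _ (by simpa using hj)]; simp
      · rw [List.getD_eq_default _ _ (by simp; omega)]
  have := recB_spec a m K 0 0
      ((List.replicate (2*m-1) 0), (List.replicate (2*m-1) []))
      (by omega) (by omega) (by simp) (by simp) hrep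
  rw [show (0:Nat) + 2^K = m from by omega] at this
  obtain ⟨B1, B2, BH⟩ := this
  have hall : ∀ j, j < 2*m-1 → InSub 0 K j := by
    intro j hj
    refine ⟨Nat.log2 (j+1), ?_, ?_⟩
    · have hlow : 2^(Nat.log2 (j+1)) ≤ j+1 := Nat.log2_self_le (by omega)
      have hup : j+1 < 2^(K+1) := by
        have : (2:Nat)^(K+1) = 2*2^K := by rw [pow_succ]; ring
        omega
      have : 2^(Nat.log2 (j+1)) < 2^(K+1) := lt_of_le_of_lt hlow hup
      have := (Nat.pow_lt_pow_iff_right (by omega : 1 < 2)).mp this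
      omega
    · refine Nat.div_eq_of_lt_le (by simpa using Nat.log2_self_le (by omega)) ?_
      have := Nat.lt_log2_self (n := j+1)
      calc j+1 < 2^(Nat.log2 (j+1) + 1) := this
        _ = (1+1) * 2^(Nat.log2 (j+1)) := by rw [pow_succ]; ring
  refine Prod.ext ?_ ?_
  · apply List.ext_getElem
    · simp [B1]
    · intro i h1 h2
      have hi : i < 2*m-1 := by rw [B1] at h1; exact h1
      have hv := ((BH i hi).1 (hall i hi)).1
      rw [List.getD_eq_getElem _ _ h1] at hv
      simp only [List.getElem_map, List.getElem_range]
      exact hv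
  · apply List.ext_getElem
    · simp [B2]
    · intro i h1 h2
      have hi : i < 2*m-1 := by rw [B2] at h1; exact h1
      have hv := ((BH i hi).1 (hall i hi)).2
      rw [List.getD_eq_getElem _ _ h1] at hv
      simp only [List.getElem_map, List.getElem_range]
      exact hv

-- ===== VERDICT (by name: the statement is the Claim_ definition above) =====
theorem build_spec : Claim_equal_build := by
  intro a _
  unfold Spec_build
  rcases Nat.eq_zero_or_pos a.length with h0 | hpos
  · have : a = [] := List.length_eq_zero_iff.mp h0
    subst this
    decide
  · rw [buildA_eq a hpos, buildB_eq a hpos]
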